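-- pv_equiv track=rewrite | github.com/zhangsonggui/comtrade-io | src/comtrade_io/inf/section_base_model.py | parse_indexes
-- ===== SOURCE A (Python) =====
-- def parse_indexes(s: str) -> list[int]:
--     indexes = [int(i.strip()) for i in s.split(',') if i.strip()]
--     result = []
--     prev = None
--     for i in indexes:
--         if prev is None or i >= prev:
--             result.append(i)
--             prev = i
--         else:
--             break
--     return result
-- ===== SOURCE B (Python) =====
-- def parse_indexes(s: str) -> list[int]:
--     nums = [int(i.strip()) for i in s.split(',') if i.strip()]
--     # Sortedness of prefixes is downward closed, so binary-search for the
--     # largest k such that nums[:k] is already in sorted order.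
--     lo, hi = 0, len(nums)
--     while lo < hi:
--         mid = (lo + hi + 1) // 2
--         if sorted(nums[:mid]) == nums[:mid]:
--             lo = mid
--         else:
--             hi = mid - 1
--     return nums[:lo]
-- ===== Notes on version B (the rewrite author's own statement) =====
-- stated objective: alternative
-- what changed: Replaced A's incremental prev/result accumulator loop with a binary search over prefix lengths for the largest k whose prefix equals its own sorted copy (sortedness of prefixes is downward closed), returning nums[:k].
import Mathlib
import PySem

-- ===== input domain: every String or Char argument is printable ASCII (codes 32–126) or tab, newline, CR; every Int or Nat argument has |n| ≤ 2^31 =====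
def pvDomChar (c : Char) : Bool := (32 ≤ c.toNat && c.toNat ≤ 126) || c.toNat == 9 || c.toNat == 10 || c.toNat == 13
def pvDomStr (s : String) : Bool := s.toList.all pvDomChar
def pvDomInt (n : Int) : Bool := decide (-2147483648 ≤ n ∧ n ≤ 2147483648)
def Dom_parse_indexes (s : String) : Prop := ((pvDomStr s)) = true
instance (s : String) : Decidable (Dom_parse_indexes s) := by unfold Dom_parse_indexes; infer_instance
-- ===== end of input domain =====

-- B replaces A's incremental prev/result accumulator with a binary search over prefix
-- lengths for the largest k whose prefix equals its own sorted copy (objective: alternative).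

-- ===== PORT A =====
-- the comprehension [int(i.strip()) for i in s.split(',') if i.strip()] (identical in both Pythons);
-- under Pre_ every kept token parses, so the filterMap is exactly the comprehension
def pvParse (s : String) : List Int :=
  ((PySem.Str.split? s ",").getD []).filterMap (fun t =>
    if PySem.Str.strip t = "" then none else PySem.Int.ofStr? (PySem.Str.strip t))

-- A's loop: prev is None or the running previous value; break stops the scan
def pvLoopA : Option Int → List Int → List Int
  | _, [] => []
  | none, i :: rest => i :: pvLoopA (some i) rest
  | some p, i :: rest => if p ≤ i then i :: pvLoopA (some i) rest else []

def parse_indexes (s : String) : List Int :=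
  pvLoopA none (pvParse s)

-- ===== PORT B =====
-- B's binary search: largest k in [lo, hi] with sorted(nums[:k]) == nums[:k].
-- The while loop is ported with a fuel counter (hi - lo shrinks every iteration,
-- so fuel = len(nums) iterations always suffice); same tests, same state.
def pvBS (nums : List Int) : Nat → Nat → Nat → Nat
  | 0, lo, _ => lo
  | fuel + 1, lo, hi =>
    if lo < hi then
      let mid := (lo + hi + 1) / 2
      if PySem.List.sorted (nums.take mid) (fun x => x) false = nums.take mid then
        pvBS nums fuel mid hi
      else
        pvBS nums fuel lo (mid - 1)
    else lo

def parse_indexes_alt (s : String) : List Int :=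
  let nums := pvParse s
  nums.take (pvBS nums nums.length 0 nums.length)

-- ===== PRECONDITION & SPEC =====
-- Pre_ excludes exactly the inputs where int() raises ValueError on some non-blank token.
def Pre_parse_indexes (s : String) : Prop :=
  (((PySem.Str.split? s ",").getD []).all (fun t =>
    PySem.Str.strip t = "" || (PySem.Int.ofStr? (PySem.Str.strip t)).isSome)) = true
instance (s : String) : Decidable (Pre_parse_indexes s) := by unfold Pre_parse_indexes; infer_instance
def pvWitness_parse_indexes : String := "1, 2 ,2,5,3, 9"
def Spec_parse_indexes (s : String) (out : List Int) : Prop := out = parse_indexes_alt s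
instance (s : String) (out : List Int) : Decidable (Spec_parse_indexes s out) := by unfold Spec_parse_indexes; infer_instance

-- ===== CLAIM (what is proved, stated in full; the proofs are below) =====
def Claim_equal_parse_indexes : Prop := ∀ (s : String), Dom_parse_indexes s → Pre_parse_indexes s → Spec_parse_indexes s (parse_indexes s)

-- ===== LEMMAS AND PROOFS =====
-- proof-only helper: the length of the longest non-decreasing prefix
def pvCut : List Int → Nat
  | [] => 0
  | [_] => 1
  | a :: b :: rest => if b < a then 1 else 1 + pvCut (b :: rest)

lemma pvCut_le_length : ∀ l : List Int, pvCut l ≤ l.length := by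
  intro l
  induction l with
  | nil => simp [pvCut]
  | cons a t ih =>
    cases t with
    | nil => simp [pvCut]
    | cons b rest =>
      rw [pvCut]
      split
      · simp
      · simp at ih ⊢; omega

lemma pvCut_pos (a : Int) (t : List Int) : 1 ≤ pvCut (a :: t) := by
  cases t with
  | nil => simp [pvCut]
  | cons b rest => rw [pvCut]; split <;> omega

lemma pvPairwise_take_iff : ∀ (l : List Int) (k : Nat), k ≤ l.length →
    ((l.take k).Pairwise (· ≤ ·) ↔ k ≤ pvCut l) := by
  intro l
  induction l with
  | nil => intro k hk; simp at hk; simp [hk, pvCut]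
  | cons a t ih =>
    intro k hk
    cases t with
    | nil =>
      simp at hk
      interval_cases k <;> simp [pvCut]
    | cons b rest =>
      match k with
      | 0 => simp [pvCut]
      | 1 => simpa using pvCut_pos a (b :: rest)
      | (j+2) =>
        have hk' : j + 1 ≤ (b :: rest).length := by simp at hk ⊢; omega
        have hih := ih (j + 1) hk'
        simp only [List.take_succ_cons] at hih ⊢
        rw [List.pairwise_cons_cons_iff_of_trans, hih, pvCut]
        split
        · rename_i hba
          constructor
          · rintro ⟨hab, -⟩; omega
          · omega
        · rename_i hba
          constructor
          · rintro ⟨-, hc⟩; omega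
          · intro hj; exact ⟨by omega, by omega⟩

lemma pvSorted_take_iff (l : List Int) (k : Nat) (hk : k ≤ l.length) :
    (PySem.List.sorted (l.take k) (fun x => x) false = l.take k) ↔ k ≤ pvCut l := by
  rw [← pvPairwise_take_iff l k hk]
  constructor
  · intro h
    have := PySem.List.sorted_pairwise (xs := l.take k) (key := fun x => x)
    rw [h] at this
    simpa using this
  · intro h
    exact PySem.List.sorted_eq_self_of_pairwise (l.take k) (fun x => x) (by simpa using h)

lemma pvBS_eq (nums : List Int) : ∀ (fuel lo hi : Nat), hi - lo ≤ fuel →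
    lo ≤ pvCut nums → pvCut nums ≤ hi → hi ≤ nums.length →
    pvBS nums fuel lo hi = pvCut nums := by
  intro fuel
  induction fuel with
  | zero => intro lo hi hf hlo hhi _; rw [pvBS]; omega
  | succ fuel ih =>
    intro lo hi hf hlo hhi hlen
    rw [pvBS]
    by_cases h : lo < hi
    · rw [if_pos h]
      by_cases hs : PySem.List.sorted (nums.take ((lo + hi + 1) / 2)) (fun x => x) false
          = nums.take ((lo + hi + 1) / 2)
      · rw [if_pos hs]
        have hmid := (pvSorted_take_iff nums ((lo + hi + 1) / 2) (by omega)).mp hs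
        exact ih _ _ (by omega) hmid hhi hlen
      · rw [if_neg hs]
        have hmid : ¬ (lo + hi + 1) / 2 ≤ pvCut nums := fun hc =>
          hs ((pvSorted_take_iff nums ((lo + hi + 1) / 2) (by omega)).mpr hc)
        exact ih _ _ (by omega) hlo (by omega) (by omega)
    · rw [if_neg h]; omega

lemma pvLoopA_some_take (t : List Int) : ∀ b : Int,
    b :: pvLoopA (some b) t = (b :: t).take (pvCut (b :: t)) := by
  induction t with
  | nil => intro b; simp [pvLoopA, pvCut]
  | cons c r ih =>
    intro b
    by_cases h : b ≤ c
    · rw [pvLoopA, pvCut, if_pos h, if_neg (not_lt.mpr h), ih c, Nat.add_comm,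
        List.take_succ_cons]
    · simp [pvLoopA, pvCut, h, not_le.mp h]

lemma pvLoopA_none_take (l : List Int) : pvLoopA none l = l.take (pvCut l) := by
  cases l with
  | nil => rfl
  | cons a t => simpa [pvLoopA] using pvLoopA_some_take t a

-- ===== VERDICT (by name: the statement is the Claim_ definition above) =====
theorem parse_indexes_spec : Claim_equal_parse_indexes := by
  intro s _ _
  show parse_indexes s = parse_indexes_alt s
  rw [parse_indexes, parse_indexes_alt, pvLoopA_none_take,
    pvBS_eq (pvParse s) (pvParse s).length 0 (pvParse s).length (by omega)
      (Nat.zero_le _) (pvCut_le_length _) (le_refl _)]
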